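-- pv_equiv track=rewrite | github.com/PR713/university-courses | ASD/91.beautree.py | beautree
-- ===== SOURCE A (Python) =====
-- def adjacency_to_edges(G):
--     n = len(G) # [[(0,1)], []...]
--     new_G = []
--     for i in range(n):
--         for v,w in G[i]:
--             if i < v:
--                 new_G.append((i,v,w))
--     return new_G
--
-- def edges_to_adj(G,n):
--     new_graph = [[] for _ in range(n)]
--     for e in G:
--         new_graph[e[0]].append((e[1],e[2]))
--         new_graph[e[1]].append((e[0],e[2]))
--     return new_graph
--
-- def DFS(G):
--     n = len(G) #adj
--     visited = [False for _ in range(n)]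
--     cnt = 0
--     for v in range(n):
--         if not visited[v]:
--             DFSvisit(G,v,visited)
--             cnt += 1
--         if cnt == 2: return False
--     return True
--
-- def DFSvisit(G,s,visited):
--     visited[s] = True
--     for u,w in G[s]:
--         if not visited[u]:
--             DFSvisit(G,u,visited)
--
-- def beautree(G):
--     V = len(G)
--     G = adjacency_to_edges(G)
--     G = sorted(G, key=lambda d: d[2])
--     E = len(G)
--     suma = float('inf')
--     if E < V - 1: return None
--     for i in range(E-V): #O(E)
--         end = i+V-1
--         edges = G[i:end] #O(V)
--         Graph = edges_to_adj(edges,V) #V-1 krawędzi, V wierzchołków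
--         #czyli DFS ma O(V+V) = O(V)
--         if DFS(Graph): #czyli n-1 krawędzi i spójny czyli MST
--             sum_tmp = 0
--             for j in edges:
--                 sum_tmp += j[2]
--             if sum_tmp < suma:
--                 suma = sum_tmp
--     return suma if suma != float('inf') else None
-- ===== SOURCE B (Python) =====
-- def beautree(G):
--     V = len(G)
--     edges = [(i, v, w) for i, row in enumerate(G) for v, w in row if i < v]
--     edges.sort(key=lambda e: e[2])
--     E = len(edges)
--     if E < V - 1:
--         return None
--     pref = [0]
--     for _, _, w in edges:
--         pref.append(pref[-1] + w)
--     best = None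
--     for i in range(E - V):
--         comp = list(range(V))
--         members = [[u] for u in range(V)]
--         for a, b, _ in edges[i:i+V-1]:
--             ca, cb = comp[a], comp[b]
--             if ca != cb:
--                 if len(members[ca]) < len(members[cb]):
--                     ca, cb = cb, ca
--                 for u in members[cb]:
--                     comp[u] = ca
--                 members[ca] += members[cb]
--                 members[cb] = []
--         if all(c == comp[0] for c in comp):
--             s = pref[i + V - 1] - pref[i]
--             if best is None or s < best:
--                 best = s
--     return best
-- ===== Notes on version B (the rewrite author's own statement) =====
-- stated objective: alternative
-- what changed: Per sorted-edge window, A rebuilds an adjacency list and runs a recursive DFS component count plus an inner summation loop; B instead detects spanning connectivity by weighted quick-find label merging (component-label array with per-class member lists, smaller class relabelled into larger) and reads each window's weight sum from a prefix-sum array built once. …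
-- outside the precondition, e.g. on beautree([[(1, 1), (2, 2)], [(2, 3), (5, 9)], []]): A returns 3, B returns 3
import Mathlib
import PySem

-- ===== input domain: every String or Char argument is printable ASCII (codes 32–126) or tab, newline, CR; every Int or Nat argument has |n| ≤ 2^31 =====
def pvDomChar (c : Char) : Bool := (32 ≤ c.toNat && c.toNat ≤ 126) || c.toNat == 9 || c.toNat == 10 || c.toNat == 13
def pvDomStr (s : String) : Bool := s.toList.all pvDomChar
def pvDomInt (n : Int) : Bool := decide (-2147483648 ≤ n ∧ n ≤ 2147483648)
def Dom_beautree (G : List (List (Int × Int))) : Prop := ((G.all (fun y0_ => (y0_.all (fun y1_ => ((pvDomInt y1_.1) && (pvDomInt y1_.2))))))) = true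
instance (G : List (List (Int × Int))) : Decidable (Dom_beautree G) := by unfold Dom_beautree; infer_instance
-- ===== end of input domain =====

-- B replaces A's per-window adjacency rebuild + recursive DFS + inner sum loop by
-- weighted quick-find label merging and a prefix-sum array (objective: alternative).

-- ===== PORT A =====
-- new_graph[i].append(x); exact for 0 ≤ i < len g (the only indices reached inside Pre_)
def pvAppendAt (g : List (List (Int × Int))) (i : Int) (x : Int × Int) : List (List (Int × Int)) :=
  g.set i.toNat ((g.getD i.toNat []) ++ [x])

def adjacencyToEdges (G : List (List (Int × Int))) : List (Int × Int × Int) :=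
  (List.range G.length).foldl (fun acc i =>
    (G.getD i []).foldl (fun acc2 p => if (i : Int) < p.1 then acc2 ++ [((i : Int), p.1, p.2)] else acc2) acc) []

def edgesToAdj (es : List (Int × Int × Int)) (n : Int) : List (List (Int × Int)) :=
  es.foldl (fun g e => pvAppendAt (pvAppendAt g e.1 (e.2.1, e.2.2)) e.2.1 (e.1, e.2.2))
    (List.replicate n.toNat [])

-- DFSvisit; fuel only makes the recursion structural: the depth is bounded by the
-- number of still-unvisited vertices, and every call passes fuel larger than that.
def dfsVisit (fuel : Nat) (Gr : List (List (Int × Int))) (s : Int) (vis : List Bool) : List Bool :=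
  match fuel with
  | 0 => vis
  | f + 1 =>
    (Gr.getD s.toNat []).foldl
      (fun v p => if v.getD p.1.toNat false = false then dfsVisit f Gr p.1 v else v)
      (vis.set s.toNat true)

def dfsA (Gr : List (List (Int × Int))) : Bool :=
  let n := Gr.length
  let st := (List.range n).foldl
    (fun (st : List Bool × Nat × Option Bool) v =>
      match st.2.2 with
      | some _ => st
      | none =>
        let st1 := if st.1.getD v false = false then (dfsVisit (n + 1) Gr (v : Int) st.1, st.2.1 + 1)
                   else (st.1, st.2.1)
        if st1.2 == 2 then (st1.1, st1.2, some false) else (st1.1, st1.2, none))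
    (List.replicate n false, 0, none)
  match st.2.2 with
  | some r => r
  | none => true

def beautree (G : List (List (Int × Int))) : Option Int :=
  let V : Int := G.length
  let es := PySem.List.sorted (adjacencyToEdges G) (fun d => d.2.2)
  let E : Int := PySem.List.len es
  if E < V - 1 then none
  else
    (PySem.List.pyRange 0 (E - V) 1).foldl
      (fun suma i =>
        let ed := PySem.List.slice es (some i) (some (i + V - 1))
        let graph := edgesToAdj ed V
        if dfsA graph then
          let s := ed.foldl (fun acc j => acc + j.2.2) 0
          match suma with
          | none => some s
          | some m => if s < m then some s else some m
        else suma)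
      none

-- ===== PORT B =====
def bStep (st : List Int × List (List Int)) (e : Int × Int × Int) : List Int × List (List Int) :=
  let ca := st.1.getD e.1.toNat 0
  let cb := st.1.getD e.2.1.toNat 0
  if ca == cb then st
  else
    let xy := if (st.2.getD ca.toNat []).length < (st.2.getD cb.toNat []).length then (cb, ca) else (ca, cb)
    let comp' := (st.2.getD xy.2.toNat []).foldl (fun c u => c.set u.toNat xy.1) st.1
    let mem' := (st.2.set xy.1.toNat ((st.2.getD xy.1.toNat []) ++ (st.2.getD xy.2.toNat []))).set xy.2.toNat []
    (comp', mem')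

def bSpans (w : List (Int × Int × Int)) (V : Int) : Bool :=
  let st := w.foldl bStep (PySem.List.pyRange 0 V 1, (PySem.List.pyRange 0 V 1).map (fun u => [u]))
  st.1.all (fun c => c == st.1.getD 0 0)

def beautree_alt (G : List (List (Int × Int))) : Option Int :=
  let V : Int := G.length
  let edges := PySem.List.sorted
    ((PySem.List.enumerate G).flatMap
      (fun p => p.2.filterMap (fun q => if p.1 < q.1 then some (p.1, q.1, q.2) else none)))
    (fun e => e.2.2)
  let E : Int := PySem.List.len edges
  if E < V - 1 then none
  else
    let pref := edges.foldl (fun pr e => pr ++ [pr.getLastD 0 + e.2.2]) [(0 : Int)]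
    (PySem.List.pyRange 0 (E - V) 1).foldl
      (fun best i =>
        if bSpans (PySem.List.slice edges (some i) (some (i + V - 1))) V then
          let s := pref.getD (i + V - 1).toNat 0 - pref.getD i.toNat 0
          match best with
          | none => some s
          | some m => if s < m then some s else some m
        else best)
      none

-- ===== PRECONDITION & SPEC =====
-- Pre_ excludes adjacency lists that keep more than len(G) forward edges (i < v) while some
-- such edge has a neighbour index v ≥ len(G): on those inputs A may raise IndexError in
-- edges_to_adj, and whether it raises depends on the malformed edge's position after sorting,
-- which a closed-form precondition cannot express.
def Pre_beautree (G : List (List (Int × Int))) : Prop :=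
  (((PySem.List.enumerate G).map
      (fun p => (p.2.filter (fun q => decide (p.1 < q.1))).length)).sum ≤ G.length)
  ∨ (∀ p ∈ PySem.List.enumerate G, ∀ q ∈ p.2, p.1 < q.1 → q.1 < (G.length : Int))
instance (G : List (List (Int × Int))) : Decidable (Pre_beautree G) := by unfold Pre_beautree; infer_instance

def pvWitness_beautree : (List (List (Int × Int))) := [[(1, 1), (2, 2)], [(2, 3), (2, 4)], []]

def Spec_beautree (G : List (List (Int × Int))) (out : Option Int) : Prop := out = beautree_alt G
instance (G : List (List (Int × Int))) (out : Option Int) : Decidable (Spec_beautree G out) := by unfold Spec_beautree; infer_instance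

-- ===== CLAIM (what is proved, stated in full; the proofs are below) =====
def Claim_equal_beautree : Prop := ∀ (G : List (List (Int × Int))), Dom_beautree G → Pre_beautree G → Spec_beautree G (beautree G)

-- ===== LEMMAS AND PROOFS =====
-- generic getD/set/count helpers
theorem pvGetD_set_self {α : Type} (l : List α) (i : Nat) (h : i < l.length) (x d : α) :
    (l.set i x).getD i d = x := by
  simp [List.getD_eq_getElem?_getD, List.getElem?_set_self h]

theorem pvGetD_set_ne {α : Type} (l : List α) (i j : Nat) (h : j ≠ i) (x : α) (d : α) :
    (l.set i x).getD j d = l.getD j d := by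
  simp [List.getD_eq_getElem?_getD, List.getElem?_set_ne (Ne.symm h)]

theorem pvGetD_lt {α : Type} (l : List α) (k : Nat) (h : k < l.length) (d : α) :
    l.getD k d = l[k] := by
  simp [List.getD_eq_getElem?_getD, List.getElem?_eq_getElem h]

theorem pvGetD_ge {α : Type} (l : List α) (k : Nat) (h : l.length ≤ k) (d : α) :
    l.getD k d = d := by
  simp [List.getD_eq_getElem?_getD, List.getElem?_eq_none_iff.2 h]

theorem pvCount_pos (v : List Bool) (s : Nat) (h : s < v.length) (hf : v.getD s false = false) :
    0 < v.count false := by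
  rw [pvGetD_lt v s h] at hf
  exact List.count_pos_iff.2 (by rw [← hf]; exact List.getElem_mem h)

theorem pvCount_set_true (v : List Bool) (s : Nat) (h : s < v.length) (hf : v.getD s false = false) :
    (v.set s true).count false + 1 = v.count false := by
  induction v generalizing s with
  | nil => simp at h
  | cons a t ih =>
    cases s with
    | zero =>
      have ha : a = false := by simpa [List.getD] using hf
      subst ha; simp
    | succ s =>
      have := ih s (by simpa using h) (by simpa [List.getD] using hf)
      simp only [List.set, List.count_cons]
      omega

theorem pvCount_false_mono (v1 v2 : List Bool) (hl : v1.length = v2.length)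
    (hm : ∀ k, v1.getD k false = true → v2.getD k false = true) :
    v2.count false ≤ v1.count false := by
  induction v1 generalizing v2 with
  | nil => cases v2 with | nil => simp | cons b t2 => simp at hl
  | cons a t ih =>
    cases v2 with
    | nil => simp at hl
    | cons b t2 =>
      have h0 : a = true → b = true := by
        intro ha; simpa [List.getD, ha] using hm 0
      have hih := ih t2 (by simpa using hl) (fun k hk => by simpa [List.getD] using hm (k + 1) (by simpa [List.getD] using hk))
      simp only [List.count_cons]
      cases a with
      | true => cases b <;> simp_all
      | false => cases b <;> simp_all <;> omega


-- the symmetric edge relation of a window of edges, and its reflexive-transitive closure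
def ERel (w : List (Int × Int × Int)) (x y : Nat) : Prop :=
  ∃ e ∈ w, (e.1 = (x : Int) ∧ e.2.1 = (y : Int)) ∨ (e.1 = (y : Int) ∧ e.2.1 = (x : Int))

def EReach (w : List (Int × Int × Int)) (x y : Nat) : Prop := Relation.ReflTransGen (ERel w) x y

def GoodE (n : Nat) (w : List (Int × Int × Int)) : Prop :=
  ∀ e ∈ w, 0 ≤ e.1 ∧ e.1 < (n : Int) ∧ 0 ≤ e.2.1 ∧ e.2.1 < (n : Int)

def AllConn (n : Nat) (w : List (Int × Int × Int)) : Prop := ∀ u, u < n → EReach w u 0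

theorem pvERel_symm {w : List (Int × Int × Int)} : ∀ {x y}, ERel w x y → ERel w y x := by
  rintro x y ⟨e, he, h⟩; exact ⟨e, he, h.symm⟩

theorem pvEReach_symm {w : List (Int × Int × Int)} {x y : Nat} (h : EReach w x y) : EReach w y x :=
  Relation.ReflTransGen.symmetric (fun _ _ h => pvERel_symm h) h

theorem pvEReach_nil {u v : Nat} : EReach [] u v ↔ u = v := by
  constructor
  · intro h
    induction h with
    | refl => rfl
    | tail _ hstep _ => rcases hstep with ⟨e, he, _⟩; simp at he
  · rintro rfl; exact Relation.ReflTransGen.refl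

theorem pvEReach_mono {p q : List (Int × Int × Int)} {x y : Nat} (h : EReach p x y) :
    EReach (p ++ q) x y :=
  Relation.ReflTransGen.mono (fun a b ⟨e, he, hc⟩ => ⟨e, List.mem_append_left _ he, hc⟩) h

theorem pvEReach_snoc {p : List (Int × Int × Int)} {e : Int × Int × Int} {u v : Nat}
    (h1 : 0 ≤ e.1) (h2 : 0 ≤ e.2.1) :
    EReach (p ++ [e]) u v ↔
      EReach p u v ∨ (EReach p u e.1.toNat ∧ EReach p e.2.1.toNat v) ∨
        (EReach p u e.2.1.toNat ∧ EReach p e.1.toNat v) := by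
  constructor
  · intro h
    induction h with
    | refl => exact Or.inl Relation.ReflTransGen.refl
    | @tail b c _ hstep ih =>
      rcases hstep with ⟨e', he', hc⟩
      rcases List.mem_append.1 he' with he'p | he'e
      · rcases ih with h | ⟨ha, hb⟩ | ⟨ha, hb⟩
        · exact Or.inl (h.tail ⟨e', he'p, hc⟩)
        · exact Or.inr (Or.inl ⟨ha, hb.tail ⟨e', he'p, hc⟩⟩)
        · exact Or.inr (Or.inr ⟨ha, hb.tail ⟨e', he'p, hc⟩⟩)
      · have he'' : e' = e := by simpa using he'e
        subst he''
        rcases hc with ⟨hb, hcv⟩ | ⟨hb, hcv⟩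
        · have hbn : b = e'.1.toNat := by omega
          have hcn : c = e'.2.1.toNat := by omega
          subst hbn; subst hcn
          rcases ih with h | ⟨ha, _⟩ | ⟨ha, _⟩
          · exact Or.inr (Or.inl ⟨h, Relation.ReflTransGen.refl⟩)
          · exact Or.inr (Or.inl ⟨ha, Relation.ReflTransGen.refl⟩)
          · exact Or.inl ha
        · have hbn : b = e'.2.1.toNat := by omega
          have hcn : c = e'.1.toNat := by omega
          subst hbn; subst hcn
          rcases ih with h | ⟨ha, _⟩ | ⟨ha, _⟩
          · exact Or.inr (Or.inr ⟨h, Relation.ReflTransGen.refl⟩)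
          · exact Or.inl ha
          · exact Or.inr (Or.inr ⟨ha, Relation.ReflTransGen.refl⟩)
  · intro h
    have hedge : EReach (p ++ [e]) e.1.toNat e.2.1.toNat :=
      Relation.ReflTransGen.single
        ⟨e, List.mem_append_right _ (by simp),
          Or.inl ⟨(Int.toNat_of_nonneg h1).symm, (Int.toNat_of_nonneg h2).symm⟩⟩
    rcases h with h | ⟨ha, hb⟩ | ⟨ha, hb⟩
    · exact pvEReach_mono h
    · exact ((pvEReach_mono ha).trans hedge).trans (pvEReach_mono hb)
    · exact ((pvEReach_mono ha).trans
        (pvEReach_symm (w := p ++ [e]) hedge)).trans (pvEReach_mono hb)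
-- ===== A-side: edgesToAdj builds exactly the symmetric adjacency of the window =====
theorem pvLength_pvAppendAt (g : List (List (Int × Int))) (i : Int) (x : Int × Int) :
    (pvAppendAt g i x).length = g.length := by simp [pvAppendAt]

theorem pvMem_pvAppendAt (g : List (List (Int × Int))) (i : Int) (hi : 0 ≤ i)
    (hlen : i.toNat < g.length) (x : Int × Int) (j : Nat) (q : Int × Int) :
    q ∈ (pvAppendAt g i x).getD j [] ↔ q ∈ g.getD j [] ∨ (j = i.toNat ∧ q = x) := by
  unfold pvAppendAt
  by_cases hj : j = i.toNat
  · subst hj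
    rw [pvGetD_set_self _ _ hlen]
    simp
  · rw [pvGetD_set_ne _ _ _ hj]
    simp [hj]

theorem pvEdgesToAdj_fold (n : Nat) :
    ∀ (w : List (Int × Int × Int)) (g : List (List (Int × Int))), GoodE n w → g.length = n →
      ((w.foldl (fun g e => pvAppendAt (pvAppendAt g e.1 (e.2.1, e.2.2)) e.2.1 (e.1, e.2.2)) g).length = n ∧
       ∀ (j : Nat) (q : Int × Int),
         q ∈ (w.foldl (fun g e => pvAppendAt (pvAppendAt g e.1 (e.2.1, e.2.2)) e.2.1 (e.1, e.2.2)) g).getD j [] ↔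
           q ∈ g.getD j [] ∨ ∃ e ∈ w, (e.1 = (j : Int) ∧ q = (e.2.1, e.2.2)) ∨ (e.2.1 = (j : Int) ∧ q = (e.1, e.2.2))) := by
  intro w
  induction w with
  | nil => intro g _ hg; exact ⟨by simpa using hg, fun j q => by simp⟩
  | cons e t ih =>
    intro g hw hg
    have he := hw e (by simp)
    have ht : GoodE n t := fun e' he' => hw e' (List.mem_cons_of_mem _ he')
    set g1 := pvAppendAt g e.1 (e.2.1, e.2.2) with hg1
    set g2 := pvAppendAt g1 e.2.1 (e.1, e.2.2) with hg2
    have hg1l : g1.length = n := by rw [hg1, pvLength_pvAppendAt, hg]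
    have hg2l : g2.length = n := by rw [hg2, pvLength_pvAppendAt, hg1l]
    obtain ⟨hL, hM⟩ := ih g2 ht hg2l
    refine ⟨by simpa using hL, fun j q => ?_⟩
    rw [List.foldl_cons, hM j q]
    have h2 : q ∈ g2.getD j [] ↔ q ∈ g1.getD j [] ∨ (j = e.2.1.toNat ∧ q = (e.1, e.2.2)) :=
      pvMem_pvAppendAt g1 e.2.1 he.2.2.1 (by rw [hg1l]; omega) _ j q
    have h1 : q ∈ g1.getD j [] ↔ q ∈ g.getD j [] ∨ (j = e.1.toNat ∧ q = (e.2.1, e.2.2)) :=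
      pvMem_pvAppendAt g e.1 he.1 (by rw [hg]; omega) _ j q
    rw [h2, h1]
    constructor
    · intro h
      rcases h with ((hq | ⟨hj, hq⟩) | ⟨hj, hq⟩) | ⟨e', he', hc⟩
      · exact Or.inl hq
      · exact Or.inr ⟨e, by simp, Or.inl ⟨by omega, hq⟩⟩
      · exact Or.inr ⟨e, by simp, Or.inr ⟨by omega, hq⟩⟩
      · exact Or.inr ⟨e', List.mem_cons_of_mem _ he', hc⟩
    · intro h
      rcases h with hq | ⟨e', he', hc⟩
      · exact Or.inl (Or.inl (Or.inl hq))
      · rcases List.mem_cons.1 he' with rfl | he't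
        · rcases hc with ⟨h1', h2'⟩ | ⟨h1', h2'⟩
          · exact Or.inl (Or.inl (Or.inr ⟨by omega, h2'⟩))
          · exact Or.inl (Or.inr ⟨by omega, h2'⟩)
        · exact Or.inr ⟨e', he't, hc⟩

theorem pvEdgesToAdj_spec (n : Nat) (w : List (Int × Int × Int)) (hw : GoodE n w) :
    (edgesToAdj w (n : Int)).length = n ∧
      ∀ (j : Nat) (q : Int × Int),
        q ∈ (edgesToAdj w (n : Int)).getD j [] ↔
          ∃ e ∈ w, (e.1 = (j : Int) ∧ q = (e.2.1, e.2.2)) ∨ (e.2.1 = (j : Int) ∧ q = (e.1, e.2.2)) := by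
  obtain ⟨hL, hM⟩ := pvEdgesToAdj_fold n w (List.replicate (n : Int).toNat []) hw (by simp)
  refine ⟨hL, fun j q => ?_⟩
  rw [edgesToAdj, hM j q]
  have : (List.replicate (n : Int).toNat ([] : List (Int × Int))).getD j [] = [] := by
    by_cases hj : j < (List.replicate (n : Int).toNat ([] : List (Int × Int))).length
    · rw [pvGetD_lt _ _ hj]; simp
    · rw [pvGetD_ge _ _ (by omega)]
  simp [this]
-- ===== A-side: what DFSvisit computes =====
def pvStep (f : Nat) (Gr : List (List (Int × Int))) : List Bool → (Int × Int) → List Bool :=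
  fun v p => if v.getD p.1.toNat false = false then dfsVisit f Gr p.1 v else v

theorem pvDfsVisit_succ (f : Nat) (Gr : List (List (Int × Int))) (s : Int) (vis : List Bool) :
    dfsVisit (f + 1) Gr s vis = (Gr.getD s.toNat []).foldl (pvStep f Gr) (vis.set s.toNat true) := rfl

theorem pvNbr_of_mem {n : Nat} {w : List (Int × Int × Int)} {Gr : List (List (Int × Int))}
    (hw : GoodE n w)
    (HADJ : ∀ (j : Nat) (q : Int × Int), q ∈ Gr.getD j [] ↔
      ∃ e ∈ w, (e.1 = (j : Int) ∧ q = (e.2.1, e.2.2)) ∨ (e.2.1 = (j : Int) ∧ q = (e.1, e.2.2)))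
    (j : Nat) (q : Int × Int) (hq : q ∈ Gr.getD j []) :
    0 ≤ q.1 ∧ q.1.toNat < n ∧ j < n ∧ ERel w j q.1.toNat := by
  obtain ⟨e, he, hc⟩ := (HADJ j q).1 hq
  obtain ⟨ha1, ha2, hb1, hb2⟩ := hw e he
  rcases hc with ⟨hj, hq'⟩ | ⟨hj, hq'⟩ <;> subst hq'
  · exact ⟨hb1, by omega, by omega, ⟨e, he, Or.inl ⟨hj, by omega⟩⟩⟩
  · exact ⟨ha1, by omega, by omega, ⟨e, he, Or.inr ⟨by omega, hj⟩⟩⟩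

theorem pvNbr_of_erel {w : List (Int × Int × Int)} {Gr : List (List (Int × Int))}
    (HADJ : ∀ (j : Nat) (q : Int × Int), q ∈ Gr.getD j [] ↔
      ∃ e ∈ w, (e.1 = (j : Int) ∧ q = (e.2.1, e.2.2)) ∨ (e.2.1 = (j : Int) ∧ q = (e.1, e.2.2)))
    {j y : Nat} (h : ERel w j y) : ∃ wt, ((y : Int), wt) ∈ Gr.getD j [] := by
  obtain ⟨e, he, hc⟩ := h
  rcases hc with ⟨h1, h2⟩ | ⟨h1, h2⟩
  · exact ⟨e.2.2, (HADJ j _).2 ⟨e, he, Or.inl ⟨h1, by rw [h2]⟩⟩⟩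
  · exact ⟨e.2.2, (HADJ j _).2 ⟨e, he, Or.inr ⟨h2, by rw [h1]⟩⟩⟩

def FInv (w : List (Int × Int × Int)) (n s : Nat) (vis v : List Bool) : Prop :=
  v.length = n ∧ v.getD s false = true ∧
  (∀ k, (vis.set s true).getD k false = true → v.getD k false = true) ∧
  (∀ k, v.getD k false = true → vis.getD k false = true ∨ EReach w s k) ∧
  (∀ x y, v.getD x false = true → (vis.set s true).getD x false = false → ERel w x y →
    v.getD y false = true) ∧
  v.count false ≤ (vis.set s true).count false

def DfsOk (w : List (Int × Int × Int)) (n s : Nat) (vis r : List Bool) : Prop :=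
  r.length = n ∧
  (∀ k, vis.getD k false = true → r.getD k false = true) ∧
  r.getD s false = true ∧
  (∀ k, r.getD k false = true → vis.getD k false = true ∨ EReach w s k) ∧
  (∀ x y, r.getD x false = true → vis.getD x false = false → ERel w x y →
    r.getD y false = true) ∧
  r.count false ≤ (vis.set s true).count false

theorem pvSet_true_mono (vis : List Bool) (s k : Nat) (hs : s < vis.length)
    (h : vis.getD k false = true) : (vis.set s true).getD k false = true := by
  by_cases hk : k = s
  · subst hk; rw [pvGetD_set_self _ _ hs]
  · rw [pvGetD_set_ne _ _ _ hk]; exact h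

theorem pvDfs_fold {n : Nat} {w : List (Int × Int × Int)} {Gr : List (List (Int × Int))}
    (hw : GoodE n w)
    (HADJ : ∀ (j : Nat) (q : Int × Int), q ∈ Gr.getD j [] ↔
      ∃ e ∈ w, (e.1 = (j : Int) ∧ q = (e.2.1, e.2.2)) ∨ (e.2.1 = (j : Int) ∧ q = (e.1, e.2.2)))
    (f : Nat)
    (IH : ∀ (s : Nat) (vis : List Bool), vis.length = n → s < n → vis.getD s false = false →
      vis.count false ≤ f → DfsOk w n s vis (dfsVisit f Gr ((s : Nat) : Int) vis))
    (s : Nat) (vis : List Bool) (hcf : (vis.set s true).count false ≤ f) :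
    ∀ (l : List (Int × Int)) (v : List Bool), (∀ p ∈ l, p ∈ Gr.getD s []) → FInv w n s vis v →
      FInv w n s vis (l.foldl (pvStep f Gr) v) ∧
      (∀ k, v.getD k false = true → (l.foldl (pvStep f Gr) v).getD k false = true) ∧
      (∀ p ∈ l, (l.foldl (pvStep f Gr) v).getD p.1.toNat false = true) := by
  intro l
  induction l with
  | nil => intro v _ hInv; exact ⟨hInv, fun _ h => h, by simp⟩
  | cons p t ih =>
    intro v hmem hInv
    have hp := hmem p (List.mem_cons_self)
    obtain ⟨hq1, hq2, hsn, hrel⟩ := pvNbr_of_mem hw HADJ s p hp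
    rw [List.foldl_cons]
    by_cases hvp : v.getD p.1.toNat false = false
    · have hstep : pvStep f Gr v p = dfsVisit f Gr p.1 v := by unfold pvStep; rw [if_pos hvp]
      obtain ⟨hvl, hroot0, hmono0, hsound0, hlc0, hcnt0⟩ := hInv
      have hcall := IH p.1.toNat v hvl hq2 hvp (le_trans hcnt0 hcf)
      have hcast : ((p.1.toNat : Nat) : Int) = p.1 := Int.toNat_of_nonneg hq1
      rw [hcast] at hcall
      obtain ⟨hl', hmono', hroot', hsound', hlc', hcnt'⟩ := hcall
      have hInv' : FInv w n s vis (dfsVisit f Gr p.1 v) := by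
        refine ⟨hl', hmono' _ hroot0, fun k hk => hmono' _ (hmono0 k hk), ?_, ?_, ?_⟩
        · intro k hk
          rcases hsound' k hk with hk' | hk'
          · exact hsound0 k hk'
          · exact Or.inr ((Relation.ReflTransGen.single hrel).trans hk')
        · intro x y hx hx1 hxy
          by_cases hvx : v.getD x false = true
          · exact hmono' _ (hlc0 x y hvx hx1 hxy)
          · exact hlc' x y hx (by simpa using hvx) hxy
        · exact le_trans (pvCount_false_mono v _ (hvl.trans hl'.symm) hmono') hcnt0
      rw [hstep]
      obtain ⟨hres, hmono2, hcov⟩ := ih (dfsVisit f Gr p.1 v)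
        (fun p' hp' => hmem p' (List.mem_cons_of_mem _ hp')) hInv'
      refine ⟨hres, fun k hk => hmono2 _ (hmono' _ hk), fun p' hp' => ?_⟩
      rcases List.mem_cons.1 hp' with rfl | hp't
      · exact hmono2 _ hroot'
      · exact hcov p' hp't
    · have hstep : pvStep f Gr v p = v := by unfold pvStep; rw [if_neg hvp]
      rw [hstep]
      obtain ⟨hres, hmono, hcov⟩ := ih v (fun p' hp' => hmem p' (List.mem_cons_of_mem _ hp')) hInv
      refine ⟨hres, hmono, fun p' hp' => ?_⟩
      rcases List.mem_cons.1 hp' with rfl | hp't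
      · exact hmono _ (by simpa using hvp)
      · exact hcov p' hp't
theorem pvDfs_ok {n : Nat} {w : List (Int × Int × Int)} {Gr : List (List (Int × Int))}
    (hw : GoodE n w)
    (HADJ : ∀ (j : Nat) (q : Int × Int), q ∈ Gr.getD j [] ↔
      ∃ e ∈ w, (e.1 = (j : Int) ∧ q = (e.2.1, e.2.2)) ∨ (e.2.1 = (j : Int) ∧ q = (e.1, e.2.2))) :
    ∀ (f : Nat) (s : Nat) (vis : List Bool), vis.length = n → s < n → vis.getD s false = false →
      vis.count false ≤ f → DfsOk w n s vis (dfsVisit f Gr ((s : Nat) : Int) vis) := by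
  intro f
  induction f with
  | zero =>
    intro s vis h1 h2 h3 h4
    exact absurd (pvCount_pos vis s (by omega) h3) (by omega)
  | succ f ihf =>
    intro s vis hlen hs hsv hc
    have hsl : s < vis.length := by omega
    have hcf : (vis.set s true).count false ≤ f := by
      have := pvCount_set_true vis s hsl hsv; omega
    have hInv0 : FInv w n s vis (vis.set s true) := by
      refine ⟨by simpa using hlen, pvGetD_set_self _ _ hsl _ _, fun _ h => h, ?_, ?_, le_refl _⟩
      · intro k hk
        by_cases hks : k = s
        · subst hks; exact Or.inr Relation.ReflTransGen.refl
        · rw [pvGetD_set_ne _ _ _ hks] at hk; exact Or.inl hk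
      · intro x y hx hx1 _
        rw [hx] at hx1; cases hx1
    obtain ⟨hInv, _hmono, hcov⟩ := pvDfs_fold hw HADJ f ihf s vis hcf
      (Gr.getD s []) (vis.set s true) (fun _ h => h) hInv0
    rw [pvDfsVisit_succ, Int.toNat_natCast]
    obtain ⟨hl, hroot, hmono1, hsound, hlc, hcnt⟩ := hInv
    refine ⟨hl, fun k hk => hmono1 k (pvSet_true_mono vis s k hsl hk), hroot, hsound, ?_, hcnt⟩
    intro x y hx hxvis hxy
    by_cases hxs : x = s
    · subst hxs
      obtain ⟨wt, hmemy⟩ := pvNbr_of_erel HADJ hxy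
      have := hcov ((y : Int), wt) hmemy
      simpa using this
    · exact hlc x y hx (by rw [pvGetD_set_ne _ _ _ hxs]; exact hxvis) hxy

-- the visited array after DFSvisit from 0 on a fresh array is exactly the reachable set
theorem pvGetD_replicate_false (m k : Nat) : (List.replicate m false).getD k false = false := by
  by_cases hk : k < m
  · rw [pvGetD_lt _ _ (by simpa using hk)]; simp
  · rw [pvGetD_ge _ _ (by simpa using hk)]

theorem pvDfs_fresh {n : Nat} {w : List (Int × Int × Int)} {Gr : List (List (Int × Int))}
    (hw : GoodE n w) (hn : 0 < n)
    (HADJ : ∀ (j : Nat) (q : Int × Int), q ∈ Gr.getD j [] ↔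
      ∃ e ∈ w, (e.1 = (j : Int) ∧ q = (e.2.1, e.2.2)) ∨ (e.2.1 = (j : Int) ∧ q = (e.1, e.2.2)))
    (f : Nat) (hf : n ≤ f) :
    ∀ k, (dfsVisit f Gr 0 (List.replicate n false)).getD k false = true ↔ EReach w 0 k := by
  have h0 : ((0 : Nat) : Int) = (0 : Int) := rfl
  have hok := pvDfs_ok hw HADJ f 0 (List.replicate n false) (by simp) hn
    (pvGetD_replicate_false n 0) (by simp [hf])
  rw [h0] at hok
  obtain ⟨_, _, hroot, hsound, hlc, _⟩ := hok
  intro k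
  constructor
  · intro hk
    rcases hsound k hk with hk' | hk'
    · rw [pvGetD_replicate_false] at hk'; cases hk'
    · exact hk'
  · intro hk
    induction hk with
    | refl => exact hroot
    | @tail b c _ hstep ihk => exact hlc b c ihk (pvGetD_replicate_false n b) hstep
def pvLoopStep (Gr : List (List (Int × Int))) :
    (List Bool × Nat × Option Bool) → Nat → (List Bool × Nat × Option Bool) :=
  fun st v =>
    match st.2.2 with
    | some _ => st
    | none =>
      let st1 := if st.1.getD v false = false then (dfsVisit (Gr.length + 1) Gr (v : Int) st.1, st.2.1 + 1)
                 else (st.1, st.2.1)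
      if st1.2 == 2 then (st1.1, st1.2, some false) else (st1.1, st1.2, none)

theorem pvDfsA_eq_loop (Gr : List (List (Int × Int))) :
    dfsA Gr = (match ((List.range Gr.length).foldl (pvLoopStep Gr)
        (List.replicate Gr.length false, 0, none)).2.2 with
      | some r => r
      | none => true) := rfl

theorem pvLoop_frozen (Gr : List (List (Int × Int))) (b : Bool) :
    ∀ (L : List Nat) (st : List Bool × Nat × Option Bool), st.2.2 = some b →
      L.foldl (pvLoopStep Gr) st = st := by
  intro L
  induction L with
  | nil => intro st _; rfl
  | cons x t ih =>
    intro st hst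
    obtain ⟨v, c, o⟩ := st
    simp only at hst
    subst hst
    rw [List.foldl_cons]
    exact ih _ rfl

theorem pvLoop_all (Gr : List (List (Int × Int))) (r : List Bool) :
    ∀ (L : List Nat), (∀ x ∈ L, r.getD x false = true) →
      L.foldl (pvLoopStep Gr) (r, 1, none) = (r, 1, none) := by
  intro L
  induction L with
  | nil => intro _; rfl
  | cons x t ih =>
    intro hall
    rw [List.foldl_cons]
    have hx := hall x (List.mem_cons_self)
    have hstep : pvLoopStep Gr (r, 1, none) x = (r, 1, none) := by
      simp [pvLoopStep, ← List.getD_eq_getElem?_getD, hx]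
    rw [hstep]
    exact ih (fun y hy => hall y (List.mem_cons_of_mem _ hy))

theorem pvLoop_not (Gr : List (List (Int × Int))) (r : List Bool) :
    ∀ (L : List Nat), (¬ ∀ x ∈ L, r.getD x false = true) →
      (L.foldl (pvLoopStep Gr) (r, 1, none)).2.2 = some false := by
  intro L
  induction L with
  | nil => intro h; exact absurd (by simp) h
  | cons x t ih =>
    intro hnall
    rw [List.foldl_cons]
    by_cases hx : r.getD x false = true
    · have hstep : pvLoopStep Gr (r, 1, none) x = (r, 1, none) := by
        simp [pvLoopStep, ← List.getD_eq_getElem?_getD, hx]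
      rw [hstep]
      refine ih (fun hall => hnall ?_)
      intro y hy
      rcases List.mem_cons.1 hy with rfl | hyt
      · exact hx
      · exact hall y hyt
    · have hx' : r.getD x false = false := by simpa using hx
      have hstep : pvLoopStep Gr (r, 1, none) x =
          (dfsVisit (Gr.length + 1) Gr (x : Int) r, 2, some false) := by
        simp [pvLoopStep, ← List.getD_eq_getElem?_getD, hx']
      rw [hstep]
      rw [pvLoop_frozen Gr false t _ rfl]

theorem pvDfsA_iff {n : Nat} {w : List (Int × Int × Int)} {Gr : List (List (Int × Int))}
    (hw : GoodE n w) (hn : 0 < n) (hGrL : Gr.length = n)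
    (HADJ : ∀ (j : Nat) (q : Int × Int), q ∈ Gr.getD j [] ↔
      ∃ e ∈ w, (e.1 = (j : Int) ∧ q = (e.2.1, e.2.2)) ∨ (e.2.1 = (j : Int) ∧ q = (e.1, e.2.2))) :
    (dfsA Gr = true) ↔ AllConn n w := by
  subst hGrL
  set n := Gr.length with hn'
  obtain ⟨m, hm⟩ : ∃ m, n = m + 1 := ⟨n - 1, by omega⟩
  set r := dfsVisit (n + 1) Gr ((0 : Nat) : Int) (List.replicate n false) with hrdef
  have hr : ∀ k, r.getD k false = true ↔ EReach w 0 k :=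
    pvDfs_fresh hw hn HADJ (n + 1) (by omega)
  have hstep0 : pvLoopStep Gr (List.replicate n false, 0, none) 0 = (r, 1, none) := by
    simp [pvLoopStep, ← List.getD_eq_getElem?_getD, pvGetD_replicate_false, hrdef, hn']
  rw [pvDfsA_eq_loop]
  rw [show List.range Gr.length = 0 :: (List.range m).map Nat.succ by
    rw [← hn', hm]; exact List.range_succ_eq_map]
  rw [List.foldl_cons, hstep0]
  by_cases hall : ∀ x ∈ (List.range m).map Nat.succ, r.getD x false = true
  · rw [pvLoop_all Gr r _ hall]
    simp only
    constructor
    · intro _ u hu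
      refine pvEReach_symm ((hr u).1 ?_)
      rcases Nat.eq_zero_or_pos u with rfl | hu0
      · exact (hr 0).2 Relation.ReflTransGen.refl
      · exact hall u (by simp only [List.mem_map, List.mem_range]; exact ⟨u - 1, by omega, by omega⟩)
    · intro _; trivial
  · rw [pvLoop_not Gr r _ hall]
    simp only
    constructor
    · intro h; cases h
    · intro hconn
      exfalso
      refine hall ?_
      intro x hx
      have hx' : x < n := by
        simp only [List.mem_map, List.mem_range] at hx
        obtain ⟨a, ha, rfl⟩ := hx
        omega
      exact (hr x).2 (pvEReach_symm (hconn x hx'))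
-- ===== B-side: the component-label array tracks exactly the connectivity classes =====
theorem pvPyRange_len (n : Nat) : (PySem.List.pyRange 0 (n : Int) 1).length = n := by
  simp [PySem.List.length_pyRange_one]

theorem pvPyRange_getD (n u : Nat) (hu : u < n) :
    (PySem.List.pyRange 0 (n : Int) 1).getD u 0 = (u : Int) := by
  rw [PySem.List.pyRange_one, List.getD_eq_getElem?_getD, List.getElem?_map,
    List.getElem?_range (by omega : u < ((n : Int) - 0).toNat)]
  simp

theorem pvPyRangeMap_getD (n c : Nat) (hc : c < n) :
    ((PySem.List.pyRange 0 (n : Int) 1).map (fun u => [u])).getD c [] = [(c : Int)] := by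
  rw [PySem.List.pyRange_one, List.getD_eq_getElem?_getD, List.getElem?_map, List.getElem?_map,
    List.getElem?_range (by omega : c < ((n : Int) - 0).toNat)]
  simp

def CInv (n : Nat) (p : List (Int × Int × Int)) (st : List Int × List (List Int)) : Prop :=
  st.1.length = n ∧
  (∀ u, u < n → ∃ c, c < n ∧ st.1.getD u 0 = (c : Int)) ∧
  (∀ u v, u < n → v < n → (st.1.getD u 0 = st.1.getD v 0 ↔ EReach p u v)) ∧
  st.2.length = n ∧
  (∀ c u, c < n → u < n → (((u : Int) ∈ st.2.getD c []) ↔ st.1.getD u 0 = (c : Int))) ∧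
  (∀ c, c < n → ∀ x ∈ st.2.getD c [], ∃ u, u < n ∧ x = (u : Int))

theorem pvCInv_init (n : Nat) :
    CInv n [] (PySem.List.pyRange 0 (n : Int) 1, (PySem.List.pyRange 0 (n : Int) 1).map (fun u => [u])) := by
  refine ⟨pvPyRange_len n, ?_, ?_, by simp [pvPyRange_len], ?_, ?_⟩
  · intro u hu; exact ⟨u, hu, pvPyRange_getD n u hu⟩
  · intro u v hu hv
    rw [pvPyRange_getD n u hu, pvPyRange_getD n v hv, pvEReach_nil]
    omega
  · intro c u hc hu
    rw [pvPyRangeMap_getD n c hc, pvPyRange_getD n u hu]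
    simp
  · intro c hc x hx
    rw [pvPyRangeMap_getD n c hc] at hx
    exact ⟨c, hc, by simpa using hx⟩

theorem pvFoldSet_length (x : Int) :
    ∀ (l : List Int) (comp : List Int), (l.foldl (fun c u => c.set u.toNat x) comp).length = comp.length := by
  intro l
  induction l with
  | nil => intro comp; rfl
  | cons z t ih => intro comp; rw [List.foldl_cons, ih]; simp

theorem pvFoldSet_getD (x : Int) :
    ∀ (l : List Int) (comp : List Int) (u : Nat), u < comp.length →
      (∀ z ∈ l, ∃ uz, uz < comp.length ∧ z = (uz : Int)) →
      (l.foldl (fun c u => c.set u.toNat x) comp).getD u 0 =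
        if (u : Int) ∈ l then x else comp.getD u 0 := by
  intro l
  induction l with
  | nil => intro comp u _ _; simp
  | cons z t ih =>
    intro comp u hu hl
    obtain ⟨uz, huz, rfl⟩ := hl z (List.mem_cons_self)
    rw [List.foldl_cons]
    rw [ih (comp.set (uz : Int).toNat x) u (by simpa using hu)
      (fun z' hz' => by
        obtain ⟨a, ha, rfl⟩ := hl z' (List.mem_cons_of_mem _ hz')
        exact ⟨a, by simpa using ha, rfl⟩)]
    by_cases hmem : (u : Int) ∈ t
    · simp [hmem]
    · by_cases heq : u = uz
      · subst heq
        rw [if_neg hmem, if_pos (List.mem_cons_self)]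
        rw [Int.toNat_natCast]
        exact pvGetD_set_self comp u hu x 0
      · rw [if_neg hmem, if_neg (by simp [hmem]; omega)]
        rw [Int.toNat_natCast]
        exact pvGetD_set_ne comp uz u heq x 0

def pvMerge (comp : List Int) (mem : List (List Int)) (x y : Int) : List Int × List (List Int) :=
  ((mem.getD y.toNat []).foldl (fun c u => c.set u.toNat x) comp,
   (mem.set x.toNat ((mem.getD x.toNat []) ++ (mem.getD y.toNat []))).set y.toNat [])

theorem pvBStep_eq (comp : List Int) (mem : List (List Int)) (e : Int × Int × Int)
    (h : comp.getD e.1.toNat 0 = comp.getD e.2.1.toNat 0) : bStep (comp, mem) e = (comp, mem) := by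
  unfold bStep
  simp only
  rw [if_pos (by simpa using h)]

theorem pvBStep_ne (comp : List Int) (mem : List (List Int)) (e : Int × Int × Int)
    (h : ¬ comp.getD e.1.toNat 0 = comp.getD e.2.1.toNat 0) :
    bStep (comp, mem) e =
      if (mem.getD (comp.getD e.1.toNat 0).toNat []).length < (mem.getD (comp.getD e.2.1.toNat 0).toNat []).length
      then pvMerge comp mem (comp.getD e.2.1.toNat 0) (comp.getD e.1.toNat 0)
      else pvMerge comp mem (comp.getD e.1.toNat 0) (comp.getD e.2.1.toNat 0) := by
  unfold bStep pvMerge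
  simp only
  rw [if_neg (by simpa using h)]
  by_cases hlt : (mem.getD (comp.getD e.1.toNat 0).toNat []).length < (mem.getD (comp.getD e.2.1.toNat 0).toNat []).length
  · rw [if_pos hlt, if_pos hlt]
  · rw [if_neg hlt, if_neg hlt]
theorem pvRelabel_iff (cu cv x y : Int) (hne : x ≠ y) :
    ((if cu = y then x else cu) = (if cv = y then x else cv)) ↔
      (cu = cv ∨ (cu = x ∧ cv = y) ∨ (cu = y ∧ cv = x)) := by
  by_cases hcu : cu = y <;> by_cases hcv : cv = y
  · simp [hcu, hcv]
  · rw [if_pos hcu, if_neg hcv]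
    constructor
    · intro h; exact Or.inr (Or.inr ⟨hcu, h.symm⟩)
    · rintro (h | ⟨h1, h2⟩ | ⟨h1, h2⟩)
      · exact absurd (h ▸ hcu) hcv
      · exact absurd (hcu ▸ h1).symm hne
      · exact h2.symm
  · rw [if_neg hcu, if_pos hcv]
    constructor
    · intro h; exact Or.inr (Or.inl ⟨h, hcv⟩)
    · rintro (h | ⟨h1, h2⟩ | ⟨h1, h2⟩)
      · exact absurd (h.symm ▸ hcv) hcu
      · exact h1
      · exact absurd h1 hcu
  · rw [if_neg hcu, if_neg hcv]
    constructor
    · intro h; exact Or.inl h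
    · rintro (h | ⟨h1, h2⟩ | ⟨h1, h2⟩)
      · exact h
      · exact absurd h2 hcv
      · exact absurd h1 hcu

theorem pvMerge_inv (n : Nat) (p : List (Int × Int × Int)) (e : Int × Int × Int)
    (comp : List Int) (mem : List (List Int)) (hinv : CInv n p (comp, mem))
    (he : 0 ≤ e.1 ∧ e.1 < (n : Int) ∧ 0 ≤ e.2.1 ∧ e.2.1 < (n : Int))
    (x y : Int)
    (hxy : (x = comp.getD e.1.toNat 0 ∧ y = comp.getD e.2.1.toNat 0) ∨
           (x = comp.getD e.2.1.toNat 0 ∧ y = comp.getD e.1.toNat 0))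
    (hne : x ≠ y) :
    CInv n (p ++ [e]) (pvMerge comp mem x y) := by
  obtain ⟨i1, i2, i3, i4, i5, i6⟩ := hinv
  simp only at i1 i2 i3 i4 i5 i6
  have han : e.1.toNat < n := by omega
  have hbn : e.2.1.toNat < n := by omega
  obtain ⟨cA, hcAn, hcA⟩ := i2 e.1.toNat han
  obtain ⟨cB, hcBn, hcB⟩ := i2 e.2.1.toNat hbn
  -- Nat forms of x and y
  obtain ⟨xN, hxNn, hxN⟩ : ∃ xN, xN < n ∧ x = (xN : Int) := by
    rcases hxy with ⟨hx, _⟩ | ⟨hx, _⟩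
    · exact ⟨cA, hcAn, by rw [hx, hcA]⟩
    · exact ⟨cB, hcBn, by rw [hx, hcB]⟩
  obtain ⟨yN, hyNn, hyN⟩ : ∃ yN, yN < n ∧ y = (yN : Int) := by
    rcases hxy with ⟨_, hy⟩ | ⟨_, hy⟩
    · exact ⟨cB, hcBn, by rw [hy, hcB]⟩
    · exact ⟨cA, hcAn, by rw [hy, hcA]⟩
  have hxyN : xN ≠ yN := by omega
  have hsnoc : ∀ u v : Nat, EReach (p ++ [e]) u v ↔
      EReach p u v ∨ (EReach p u e.1.toNat ∧ EReach p e.2.1.toNat v) ∨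
        (EReach p u e.2.1.toNat ∧ EReach p e.1.toNat v) :=
    fun u v => pvEReach_snoc he.1 he.2.2.1
  -- the relabelled component array, pointwise
  have hcomp' : ∀ u, u < n →
      ((mem.getD y.toNat []).foldl (fun c u => c.set u.toNat x) comp).getD u 0 =
        if comp.getD u 0 = y then x else comp.getD u 0 := by
    intro u hu
    rw [pvFoldSet_getD x (mem.getD y.toNat []) comp u (by omega)
      (fun z hz => by
        obtain ⟨a, ha, rfl⟩ := i6 y.toNat (by omega) z hz
        exact ⟨a, by omega, rfl⟩)]
    have : ((u : Int) ∈ mem.getD y.toNat []) ↔ comp.getD u 0 = (yN : Int) := by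
      have := i5 y.toNat u (by omega) hu
      rwa [show ((y.toNat : Nat) : Int) = (yN : Int) by omega] at this
    by_cases hmem : (u : Int) ∈ mem.getD y.toNat []
    · rw [if_pos hmem, if_pos (by rw [this.1 hmem, hyN])]
    · rw [if_neg hmem, if_neg (fun hc => hmem (this.2 (by rw [hc, hyN])))]
  have hlen' : ((mem.getD y.toNat []).foldl (fun c u => c.set u.toNat x) comp).length = n := by
    rw [pvFoldSet_length, i1]
  -- the member lists after the merge
  have hyt : y.toNat = yN := by omega
  have hxt : x.toNat = xN := by omega
  have hmemy : ((mem.set x.toNat ((mem.getD x.toNat []) ++ (mem.getD y.toNat []))).set y.toNat []).getD yN [] = [] := by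
    rw [hyt]
    exact pvGetD_set_self _ yN (by simp [i4]; omega) _ _
  have hmemx : ((mem.set x.toNat ((mem.getD x.toNat []) ++ (mem.getD y.toNat []))).set y.toNat []).getD xN [] =
      (mem.getD xN []) ++ (mem.getD yN []) := by
    rw [hyt, pvGetD_set_ne _ yN xN hxyN, hxt, pvGetD_set_self _ xN (by omega) _ _]
  have hmemo : ∀ c, c ≠ xN → c ≠ yN →
      ((mem.set x.toNat ((mem.getD x.toNat []) ++ (mem.getD y.toNat []))).set y.toNat []).getD c [] =
        mem.getD c [] := by
    intro c hcx hcy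
    rw [hyt, pvGetD_set_ne _ yN c hcy, hxt, pvGetD_set_ne _ xN c hcx]
  -- the class equalities as reachability
  have hclsA : ∀ t, t < n → (comp.getD t 0 = comp.getD e.1.toNat 0 ↔ EReach p t e.1.toNat) :=
    fun t ht => i3 t e.1.toNat ht han
  have hclsB : ∀ t, t < n → (comp.getD t 0 = comp.getD e.2.1.toNat 0 ↔ EReach p t e.2.1.toNat) :=
    fun t ht => i3 t e.2.1.toNat ht hbn
  have hAB : ¬ comp.getD e.1.toNat 0 = comp.getD e.2.1.toNat 0 := by
    rcases hxy with ⟨hx, hy⟩ | ⟨hx, hy⟩ <;> rw [← hx, ← hy] <;> [exact hne; exact fun hc => hne hc.symm]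
  refine ⟨by simp only [pvMerge]; exact hlen', ?_, ?_, ?_, ?_, ?_⟩
  · -- labels stay in range
    intro u hu
    simp only [pvMerge]
    rw [hcomp' u hu]
    by_cases hcy : comp.getD u 0 = y
    · rw [if_pos hcy]; exact ⟨xN, hxNn, hxN⟩
    · rw [if_neg hcy]; exact i2 u hu
  · -- class equality ↔ reachability over p ++ [e]
    intro u v hu hv
    simp only [pvMerge]
    rw [hcomp' u hu, hcomp' v hv, hsnoc u v]
    have hsymmB : EReach p e.2.1.toNat v ↔ EReach p v e.2.1.toNat := ⟨pvEReach_symm, pvEReach_symm⟩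
    have hsymmA : EReach p e.1.toNat v ↔ EReach p v e.1.toNat := ⟨pvEReach_symm, pvEReach_symm⟩
    rw [← i3 u v hu hv, hsymmB, hsymmA, ← hclsA u hu, ← hclsA v hv, ← hclsB u hu, ← hclsB v hv]
    rcases hxy with ⟨hx, hy⟩ | ⟨hx, hy⟩
    · rw [hx, hy, pvRelabel_iff _ _ _ _ (by rw [← hx, ← hy]; exact hne)]
    · rw [hx, hy, pvRelabel_iff _ _ _ _ (by rw [← hx, ← hy]; exact hne)]
      tauto
  · simp only [pvMerge]
    simp [i4]
  · -- member lists describe the classes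
    intro c u hc hu
    simp only [pvMerge]
    rw [hcomp' u hu]
    by_cases hcy : c = yN
    · subst hcy
      rw [hmemy]
      constructor
      · intro h; cases h
      · intro h
        by_cases hcu : comp.getD u 0 = y
        · rw [if_pos hcu] at h; exact absurd (by omega : x = y) hne
        · rw [if_neg hcu] at h; exact absurd (by rw [h, ← hyN]) hcu
    · by_cases hcx : c = xN
      · rw [hcx]
        rw [hmemx, List.mem_append]
        have h5x := i5 xN u (by omega) hu
        have h5y : ((u : Int) ∈ mem.getD yN []) ↔ comp.getD u 0 = (yN : Int) := i5 yN u (by omega) hu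
        rw [h5x, h5y]
        by_cases hcu : comp.getD u 0 = y
        · rw [if_pos hcu]
          constructor
          · intro _; rw [hxN]
          · intro _; right; rw [← hyN]; exact hcu
        · rw [if_neg hcu]
          constructor
          · rintro (h | h)
            · exact h
            · exact absurd (by rw [hyN]; exact h) hcu
          · intro h; exact Or.inl h
      · rw [hmemo c hcx hcy]
        rw [i5 c u hc hu]
        by_cases hcu : comp.getD u 0 = y
        · rw [if_pos hcu]
          constructor
          · intro h; exact absurd (by omega : c = yN) hcy
          · intro h; exact absurd (by omega : c = xN) hcx
        · rw [if_neg hcu]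
  · -- member lists hold genuine vertices
    intro c hc z hz
    simp only [pvMerge] at hz
    by_cases hcy : c = yN
    · subst hcy; rw [hmemy] at hz; cases hz
    · by_cases hcx : c = xN
      · rw [hcx] at hz
        rw [hmemx, List.mem_append] at hz
        rcases hz with hz | hz
        · exact i6 xN (by omega) z hz
        · exact i6 yN (by omega) z hz
      · rw [hmemo c hcx hcy] at hz
        exact i6 c hc z hz
theorem pvBStep_inv (n : Nat) (p : List (Int × Int × Int)) (e : Int × Int × Int)
    (st : List Int × List (List Int)) (hinv : CInv n p st)
    (he : 0 ≤ e.1 ∧ e.1 < (n : Int) ∧ 0 ≤ e.2.1 ∧ e.2.1 < (n : Int)) :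
    CInv n (p ++ [e]) (bStep st e) := by
  obtain ⟨comp, mem⟩ := st
  by_cases hcc : comp.getD e.1.toNat 0 = comp.getD e.2.1.toNat 0
  · rw [pvBStep_eq comp mem e hcc]
    obtain ⟨i1, i2, i3, i4, i5, i6⟩ := hinv
    simp only at i1 i2 i3 i4 i5 i6
    have han : e.1.toNat < n := by omega
    have hbn : e.2.1.toNat < n := by omega
    have hab : EReach p e.1.toNat e.2.1.toNat := (i3 _ _ han hbn).1 hcc
    refine ⟨i1, i2, ?_, i4, i5, i6⟩
    intro u v hu hv
    rw [pvEReach_snoc he.1 he.2.2.1]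
    simp only
    rw [i3 u v hu hv]
    constructor
    · exact Or.inl
    · rintro (h | ⟨h1, h2⟩ | ⟨h1, h2⟩)
      · exact h
      · exact (h1.trans hab).trans h2
      · exact (h1.trans (pvEReach_symm hab)).trans h2
  · rw [pvBStep_ne comp mem e hcc]
    by_cases hlt : (mem.getD (comp.getD e.1.toNat 0).toNat []).length <
        (mem.getD (comp.getD e.2.1.toNat 0).toNat []).length
    · rw [if_pos hlt]
      exact pvMerge_inv n p e comp mem hinv he _ _ (Or.inr ⟨rfl, rfl⟩) (fun h => hcc h.symm)
    · rw [if_neg hlt]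
      exact pvMerge_inv n p e comp mem hinv he _ _ (Or.inl ⟨rfl, rfl⟩) hcc

theorem pvBFold_inv (n : Nat) :
    ∀ (w' p : List (Int × Int × Int)) (st : List Int × List (List Int)),
      GoodE n w' → CInv n p st → CInv n (p ++ w') (w'.foldl bStep st) := by
  intro w'
  induction w' with
  | nil => intro p st _ h; simpa using h
  | cons e t ih =>
    intro p st hw h
    rw [List.foldl_cons]
    have he := hw e (List.mem_cons_self)
    have := ih (p ++ [e]) (bStep st e) (fun e' he' => hw e' (List.mem_cons_of_mem _ he'))
      (pvBStep_inv n p e st h he)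
    simpa using this

theorem pvBSpans_iff (n : Nat) (hn : 0 < n) (w : List (Int × Int × Int)) (hw : GoodE n w) :
    (bSpans w (n : Int) = true) ↔ AllConn n w := by
  have hinv := pvBFold_inv n w []
    (PySem.List.pyRange 0 (n : Int) 1, (PySem.List.pyRange 0 (n : Int) 1).map (fun u => [u]))
    hw (pvCInv_init n)
  rw [List.nil_append] at hinv
  obtain ⟨i1, i2, i3, _, _, _⟩ := hinv
  unfold bSpans
  simp only [List.all_eq_true]
  constructor
  · intro hall u hu
    have hu' := i2 u hu
    have h0 : (w.foldl bStep (PySem.List.pyRange 0 (n : Int) 1,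
        (PySem.List.pyRange 0 (n : Int) 1).map (fun u => [u]))).1.getD u 0 ∈
        (w.foldl bStep (PySem.List.pyRange 0 (n : Int) 1,
          (PySem.List.pyRange 0 (n : Int) 1).map (fun u => [u]))).1 := by
      rw [pvGetD_lt _ u (by omega)]
      exact List.getElem_mem _
    have := hall _ h0
    rw [beq_iff_eq] at this
    exact (i3 u 0 hu hn).1 this
  · intro hconn c hc
    rw [beq_iff_eq]
    obtain ⟨u, hu, hcu⟩ := List.mem_iff_getElem.1 hc
    have hun : u < n := by omega
    have h1 : (w.foldl bStep (PySem.List.pyRange 0 (n : Int) 1,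
        (PySem.List.pyRange 0 (n : Int) 1).map (fun u => [u]))).1.getD u 0 = c := by
      rw [pvGetD_lt _ u hu]; exact hcu
    rw [← h1]
    exact (i3 u 0 hun hn).2 (hconn u hun)

-- ===== the heart: B's label merging decides exactly what A's DFS decides =====
theorem pvSpans_eq_dfsA (n : Nat) (hn : 0 < n) (w : List (Int × Int × Int)) (hw : GoodE n w) :
    bSpans w (n : Int) = dfsA (edgesToAdj w (n : Int)) := by
  obtain ⟨hL, hM⟩ := pvEdgesToAdj_spec n w hw
  have h1 := pvBSpans_iff n hn w hw
  have h2 := pvDfsA_iff hw hn hL hM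
  by_cases hc : AllConn n w
  · rw [h1.2 hc, h2.2 hc]
  · rcases hb1 : bSpans w (n : Int) with _ | _
    · rcases hb2 : dfsA (edgesToAdj w (n : Int)) with _ | _
      · rfl
      · exact absurd (h2.1 hb2) hc
    · exact absurd (h1.1 hb1) hc
-- ===== glue: both programs build the same sorted edge list; prefix sums name the window sums =====
theorem pvFilterMap_edge (i : Int) (l : List (Int × Int)) :
    l.filterMap (fun q => if i < q.1 then some (i, q.1, q.2) else none) =
      (l.filter (fun q => decide (i < q.1))).map (fun q => (i, q.1, q.2)) := by
  induction l with
  | nil => rfl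
  | cons a t ih =>
    by_cases h : i < a.1 <;> simp [List.filter_cons, h, ih]

theorem pvEdges_eq (G : List (List (Int × Int))) :
    adjacencyToEdges G =
      (PySem.List.enumerate G).flatMap
        (fun p => p.2.filterMap (fun q => if p.1 < q.1 then some (p.1, q.1, q.2) else none)) := by
  unfold adjacencyToEdges
  rw [PySem.List.foldl_congr_mem' (List.range G.length) _
    (fun acc i => acc ++ ((G.getD i []).filter (fun q => decide ((i : Int) < q.1))).map
      (fun q => ((i : Int), q.1, q.2))) []
    (fun i _ acc => PySem.List.foldl_append_ite (fun q => (i : Int) < q.1)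
      (fun q => ((i : Int), q.1, q.2)) (G.getD i []) acc)]
  rw [PySem.List.foldl_append_eq_flatMap, List.nil_append]
  rw [PySem.List.enumerate_eq_map_pyRange G ([] : List (Int × Int)), List.flatMap_map]
  rw [PySem.List.pyRange_one, show ((PySem.List.len G : Int) - 0).toNat = G.length by
    simp [PySem.List.len_eq], List.flatMap_map]
  apply List.flatMap_congr
  intro k _
  simp only [zero_add, PySem.List.pyGetD_natCast]
  rw [pvFilterMap_edge (k : Int) (G.getD k [])]

theorem pvEdges_len (G : List (List (Int × Int))) :
    (adjacencyToEdges G).length =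
      ((PySem.List.enumerate G).map
        (fun p => (p.2.filter (fun q => decide (p.1 < q.1))).length)).sum := by
  rw [pvEdges_eq, List.length_flatMap]
  congr 1
  apply List.map_congr_left
  intro p _
  rw [pvFilterMap_edge p.1 p.2, List.length_map]

theorem pvEdges_good (G : List (List (Int × Int)))
    (hwf : ∀ p ∈ PySem.List.enumerate G, ∀ q ∈ p.2, p.1 < q.1 → q.1 < (G.length : Int)) :
    GoodE G.length (adjacencyToEdges G) := by
  rw [pvEdges_eq]
  intro e he
  obtain ⟨p, hp, hq⟩ := List.mem_flatMap.1 he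
  obtain ⟨q, hq2, hsome⟩ := List.mem_filterMap.1 hq
  by_cases hlt : p.1 < q.1
  · rw [if_pos hlt] at hsome
    obtain rfl : (p.1, q.1, q.2) = e := by injection hsome
    obtain ⟨k, hk, rfl⟩ := (PySem.List.mem_enumerate_iff G 0 p).1 hp
    have hql := hwf _ hp q hq2 hlt
    simp only [zero_add] at hlt hql ⊢
    refine ⟨by omega, by exact_mod_cast hk, by omega, hql⟩
  · rw [if_neg hlt] at hsome; cases hsome

def pvPsums (s : Int) : List (Int × Int × Int) → List Int
  | [] => []
  | e :: t => (s + e.2.2) :: pvPsums (s + e.2.2) t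

theorem pvPref_build : ∀ (es : List (Int × Int × Int)) (pr : List Int), pr ≠ [] →
    es.foldl (fun pr e => pr ++ [pr.getLastD 0 + e.2.2]) pr = pr ++ pvPsums (pr.getLastD 0) es := by
  intro es
  induction es with
  | nil => intro pr _; simp [pvPsums]
  | cons e t ih =>
    intro pr hpr
    rw [List.foldl_cons, ih _ (by simp)]
    have hlast : (pr ++ [pr.getLastD 0 + e.2.2]).getLastD 0 = pr.getLastD 0 + e.2.2 := by simp
    rw [hlast]
    simp [pvPsums]

theorem pvPsums_getD : ∀ (es : List (Int × Int × Int)) (s : Int) (k : Nat), k < es.length →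
    (pvPsums s es).getD k 0 = s + ((es.take (k + 1)).map (fun e => e.2.2)).sum := by
  intro es
  induction es with
  | nil => intro s k h; simp at h
  | cons e t ih =>
    intro s k hk
    cases k with
    | zero => simp [pvPsums, List.getD]
    | succ k =>
      have := ih (s + e.2.2) k (by simpa using hk)
      simp only [pvPsums, List.getD_cons_succ] at this ⊢
      rw [this]
      simp only [List.take_succ_cons, List.map_cons, List.sum_cons]
      ring

theorem pvPref_getD (es : List (Int × Int × Int)) (k : Nat) (hk : k ≤ es.length) :
    (es.foldl (fun pr e => pr ++ [pr.getLastD 0 + e.2.2]) [(0 : Int)]).getD k 0 =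
      ((es.take k).map (fun e => e.2.2)).sum := by
  rw [pvPref_build es [0] (by simp)]
  have h0 : ([(0 : Int)]).getLastD 0 = 0 := rfl
  rw [h0]
  cases k with
  | zero => simp
  | succ k =>
    have hcons : ([(0 : Int)] ++ pvPsums 0 es).getD (k + 1) 0 = (pvPsums 0 es).getD k 0 := by
      simp [List.getD]
    rw [hcons, pvPsums_getD es 0 k (by omega)]
    simp
theorem pvMain (G : List (List (Int × Int))) (hPre : Pre_beautree G) :
    beautree G = beautree_alt G := by
  unfold beautree beautree_alt
  rw [← pvEdges_eq G]
  simp only [PySem.List.len_eq]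
  by_cases hguard : ((PySem.List.sorted (adjacencyToEdges G) (fun d => d.2.2)).length : Int) <
      (G.length : Int) - 1
  · rw [if_pos hguard, if_pos hguard]
  · rw [if_neg hguard, if_neg hguard]
    set es := PySem.List.sorted (adjacencyToEdges G) (fun d => d.2.2) with hes
    have hlen : es.length = (adjacencyToEdges G).length := PySem.List.length_sorted _ _ _
    rcases hPre with hsmall | hwf
    · -- at most V kept edges: the window loop is empty on both sides
      have hcnt : (adjacencyToEdges G).length ≤ G.length := by rw [pvEdges_len G]; exact hsmall
      rw [PySem.List.pyRange_one_eq_nil (by omega)]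
      rfl
    · -- well-formed neighbours: the loops agree pointwise
      have hgood := pvEdges_good G hwf
      have hsg : GoodE G.length es := fun e he => hgood e ((PySem.List.mem_sorted _ _ _ e).1 he)
      refine PySem.List.foldl_congr_mem' _ _ _ _ ?_
      intro i hi acc
      obtain ⟨hi0, hiE⟩ := PySem.List.mem_pyRange_one.1 hi
      have hVpos : 0 < G.length := by
        by_contra h0
        have hlen1 : 0 < es.length := by omega
        obtain ⟨e, he⟩ := List.exists_mem_of_length_pos hlen1
        have := hsg e he
        omega
      have hwgood : GoodE G.length (PySem.List.slice es (some i) (some (i + (G.length : Int) - 1))) :=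
        fun e he => hsg e (PySem.List.mem_of_mem_slice _ _ _ he)
      have hcond : dfsA (edgesToAdj (PySem.List.slice es (some i) (some (i + (G.length : Int) - 1)))
          (G.length : Int)) =
          bSpans (PySem.List.slice es (some i) (some (i + (G.length : Int) - 1))) (G.length : Int) :=
        (pvSpans_eq_dfsA G.length hVpos _ hwgood).symm
      have hx1 : (0 : Int) ≤ i + (G.length : Int) - 1 := by omega
      have hsum : (PySem.List.slice es (some i) (some (i + (G.length : Int) - 1))).foldl
          (fun acc j => acc + j.2.2) 0 =
          (es.foldl (fun pr e => pr ++ [pr.getLastD 0 + e.2.2]) [(0 : Int)]).getD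
              (i + (G.length : Int) - 1).toNat 0 -
            (es.foldl (fun pr e => pr ++ [pr.getLastD 0 + e.2.2]) [(0 : Int)]).getD i.toNat 0 := by
        rw [PySem.List.slice_toNat es hi0 hx1, PySem.List.foldl_add]
        have hbE : (i + (G.length : Int) - 1).toNat ≤ es.length := by omega
        rw [pvPref_getD es _ hbE, pvPref_getD es i.toNat (by omega)]
        rw [show (i + (G.length : Int) - 1).toNat = i.toNat + ((i + (G.length : Int) - 1).toNat - i.toNat) by omega]
        rw [List.take_add, List.map_append, List.sum_append]
        simp only [Nat.add_sub_cancel_left]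
        omega
      rw [hcond, hsum]

-- ===== VERDICT (by name: the statement is the Claim_ definition above) =====
theorem beautree_spec : Claim_equal_beautree := by
  intro G _hDom hPre
  exact pvMain G hPre
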